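-- pv_equiv track=rewrite | github.com/siqment/DOLGI | lab№3.py | rarest_word
-- ===== SOURCE A (Python) =====
-- from collections import Counter
--
-- def rarest_word(string):
--     if not string or string.isdigit():
--         return 'Нет слов'
--     new_string = ''
--     for i in string:
--         if i.isalpha() or i.isspace():
--             new_string = new_string + i.lower()
--     split_string = new_string.split()
--     word_freqs = Counter(split_string)
--
--     if not word_freqs:
--         return 'Нет слов'
--
--     words = [i for i in word_freqs if word_freqs.get(i) == min(word_freqs.values())]
--     return sorted(words)[0]
-- ===== SOURCE B (Python) =====
-- def rarest_word(string):
--     if not string or string.isdigit():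
--         return 'Нет слов'
--     filtered = ''.join(c.lower() for c in string if c.isalpha() or c.isspace())
--     words = sorted(filtered.split())
--     if not words:
--         return 'Нет слов'
--     best_word, best_count = None, 0
--     i, n = 0, len(words)
--     while i < n:
--         j = i + 1
--         while j < n and words[j] == words[i]:
--             j += 1
--         if best_word is None or j - i < best_count:
--             best_word, best_count = words[i], j - i
--         i = j
--     return best_word
-- ===== Notes on version B (the rewrite author's own statement) =====
-- stated objective: alternative
-- what changed: Replaces the Counter + min(values) + filter-keys + full sort of candidates by sorting the word list once and doing a single grouped scan over equal consecutive words, keeping the first run with a strictly smaller count (lex order of the scan gives the tie-break).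
import Mathlib
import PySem

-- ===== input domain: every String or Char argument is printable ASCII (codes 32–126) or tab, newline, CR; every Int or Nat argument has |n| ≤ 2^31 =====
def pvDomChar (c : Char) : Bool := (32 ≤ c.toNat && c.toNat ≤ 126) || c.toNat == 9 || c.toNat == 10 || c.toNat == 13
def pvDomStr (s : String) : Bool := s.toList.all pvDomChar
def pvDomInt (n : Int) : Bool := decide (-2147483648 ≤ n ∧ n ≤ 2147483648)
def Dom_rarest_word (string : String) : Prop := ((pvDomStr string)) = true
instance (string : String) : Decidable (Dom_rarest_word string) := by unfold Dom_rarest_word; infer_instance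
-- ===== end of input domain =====

-- B replaces Counter + min(values) + key-filter + sort of candidates with one sort of the word
-- list and a single grouped scan over equal consecutive words (alternative decomposition).

-- ===== PORT A =====
def rarest_word (string : String) : String :=
  if string = "" ∨ PySem.Str.strIsdigit string then "Нет слов"
  else
    let new_string : List Char := string.toList.foldl
      (fun acc i => if PySem.Chars.isalpha i || PySem.Chars.isspace i
                    then acc ++ [PySem.Chars.lowerChar i] else acc) []
    let split_string : List String := PySem.Str.split₀ (String.ofList new_string)
    let word_freqs := PySem.Dict.counter split_string
    if PySem.Dict.size word_freqs = 0 then "Нет слов"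
    else
      let words := word_freqs.keys.filter
        (fun i => word_freqs.get? i == PySem.List.min? word_freqs.values (fun x => x))
      (PySem.List.sorted words (fun x => x)).headD ""  -- sorted(words)[0]; words is provably nonempty, headD is a totality guard

-- ===== PORT B =====
-- the two nested while loops of Source B: consume one run of equal words, keep it if strictly rarer
def pvRuns : List String → Option (String × Nat) → String
  | [], best => match best with | some (w, _) => w | none => ""
  | w :: rest, best =>
    let run := rest.takeWhile (fun x => x == w)
    let k := run.length + 1
    let best' :=
      match best with
      | none => some (w, k)
      | some (bw, bc) => if k < bc then some (w, k) else some (bw, bc)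
    pvRuns (rest.drop run.length) best'
termination_by xs _ => xs.length
decreasing_by simp [List.length_drop]

def rarest_word_alt (string : String) : String :=
  if string = "" ∨ PySem.Str.strIsdigit string then "Нет слов"
  else
    let filtered := String.ofList ((string.toList.filter
        (fun c => PySem.Chars.isalpha c || PySem.Chars.isspace c)).map PySem.Chars.lowerChar)
    let words := PySem.List.sorted (PySem.Str.split₀ filtered) (fun x => x)
    if words = [] then "Нет слов" else pvRuns words none

-- ===== PRECONDITION & SPEC =====
def Spec_rarest_word (string : String) (out : String) : Prop := out = rarest_word_alt string
instance (string : String) (out : String) : Decidable (Spec_rarest_word string out) := by unfold Spec_rarest_word; infer_instance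

-- ===== CLAIM (what is proved, stated in full; the proofs are below) =====
def Claim_equal_rarest_word : Prop := ∀ (string : String), Dom_rarest_word string → Spec_rarest_word string (rarest_word string)

-- ===== LEMMAS AND PROOFS =====

theorem pv_foldl_filter_map (p : Char → Bool) (xs : List Char) (acc : List Char) :
    xs.foldl (fun acc i => if p i then acc ++ [PySem.Chars.lowerChar i] else acc) acc
      = acc ++ (xs.filter p).map PySem.Chars.lowerChar := by
  induction xs generalizing acc with
  | nil => simp
  | cons x xs ih =>
    by_cases h : p x <;> simp [h, ih]

-- the distinct words of a sorted list, each with its run length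
def runsOf : List String → List (String × Nat)
  | [] => []
  | w :: rest =>
    (w, (rest.takeWhile (fun x => x == w)).length + 1)
      :: runsOf (rest.drop (rest.takeWhile (fun x => x == w)).length)
termination_by xs => xs.length
decreasing_by simp [List.length_drop]

-- the strict-< scan of Source B over the runs
def fmAux : List (String × Nat) → (String × Nat) → (String × Nat)
  | [], b => b
  | p :: ps, b => fmAux ps (if p.2 < b.2 then p else b)

def pmin (ps : List (String × Nat)) (b : String × Nat) : Nat :=
  ps.foldl (fun a p => min a p.2) b.2

theorem pvRuns_eq_fmAux : ∀ (S : List String) (b : String × Nat),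
    pvRuns S (some b) = (fmAux (runsOf S) b).1 := by
  intro S
  induction S using runsOf.induct with
  | case1 => intro b; rw [pvRuns]; simp [runsOf, fmAux]
  | case2 w rest ih =>
    intro b
    rw [pvRuns, runsOf]
    simp only [fmAux]
    obtain ⟨bw, bc⟩ := b
    by_cases h : (rest.takeWhile (fun x => x == w)).length + 1 < bc <;>
      simp only [h, if_pos] <;> exact ih _

theorem pvRuns_none (w : String) (rest : List String) :
    pvRuns (w :: rest) none
      = (fmAux (runsOf (rest.drop (rest.takeWhile (fun x => x == w)).length))
          (w, (rest.takeWhile (fun x => x == w)).length + 1)).1 := by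
  rw [pvRuns]
  exact pvRuns_eq_fmAux _ _

theorem pmin_le_seed : ∀ (ps : List (String × Nat)) (b : String × Nat), pmin ps b ≤ b.2 := by
  intro ps
  induction ps with
  | nil => intro b; simp [pmin]
  | cons p ps ih =>
    intro b
    have h := ih (if p.2 < b.2 then p else b)
    simp only [pmin, List.foldl_cons] at *
    split_ifs at h with hc
    · calc ps.foldl (fun a q => min a q.2) (min b.2 p.2)
            = ps.foldl (fun a q => min a q.2) p.2 := by rw [Nat.min_eq_right (le_of_lt hc)]
        _ ≤ p.2 := h
        _ ≤ b.2 := le_of_lt hc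
    · calc ps.foldl (fun a q => min a q.2) (min b.2 p.2)
            = ps.foldl (fun a q => min a q.2) b.2 := by rw [Nat.min_eq_left (by omega)]
        _ ≤ b.2 := h

theorem fm_spec : ∀ (ps : List (String × Nat)) (b : String × Nat),
    ((b :: ps).filter (fun p => p.2 = pmin ps b)).head? = some (fmAux ps b) := by
  intro ps
  induction ps with
  | nil => intro b; simp [pmin, fmAux]
  | cons p ps ih =>
    intro b
    by_cases hc : p.2 < b.2
    · have key : pmin (p :: ps) b = pmin ps p := by
        simp only [pmin, List.foldl_cons, Nat.min_eq_right (le_of_lt hc)]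
      have hfm : fmAux (p :: ps) b = fmAux ps p := by simp [fmAux, hc]
      have hb2 : ¬ (b.2 = pmin ps p) := by
        have := pmin_le_seed ps p; omega
      rw [hfm, ← ih p, key]
      simp [List.filter_cons, hb2]
    · have key : pmin (p :: ps) b = pmin ps b := by
        simp only [pmin, List.foldl_cons, Nat.min_eq_left (by omega : b.2 ≤ p.2)]
      have hfm : fmAux (p :: ps) b = fmAux ps b := by simp [fmAux, hc]
      rw [hfm, ← ih b, key]
      by_cases hb : b.2 = pmin ps b
      · simp [List.filter_cons, hb]
      · have hp : ¬ (p.2 = pmin ps b) := by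
          have := pmin_le_seed ps b; omega
        simp [hb, hp]

theorem runs_step (w : String) (rest : List String) (hs : (w :: rest).Pairwise (· ≤ ·)) :
    (rest.takeWhile (fun x => x == w) ++ rest.drop (rest.takeWhile (fun x => x == w)).length = rest) ∧
    (∀ x ∈ rest.drop (rest.takeWhile (fun x => x == w)).length, w < x) ∧
    (rest.drop (rest.takeWhile (fun x => x == w)).length).Pairwise (· ≤ ·) ∧
    ((w :: rest).count w = (rest.takeWhile (fun x => x == w)).length + 1) ∧
    (∀ v, w ≠ v → (w :: rest).count v = (rest.drop (rest.takeWhile (fun x => x == w)).length).count v) := by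
  have hdw : rest.drop (rest.takeWhile (fun x => x == w)).length
      = rest.dropWhile (fun x => x == w) := by
    calc rest.drop (rest.takeWhile (fun x => x == w)).length
        = (rest.takeWhile (fun x => x == w) ++ rest.dropWhile (fun x => x == w)).drop
            (rest.takeWhile (fun x => x == w)).length := by
          rw [List.takeWhile_append_dropWhile]
      _ = rest.dropWhile (fun x => x == w) := List.drop_left
  have hwle : ∀ x ∈ rest, w ≤ x := (List.pairwise_cons.1 hs).1
  have hsrest : rest.Pairwise (· ≤ ·) := (List.pairwise_cons.1 hs).2
  have ht : ∀ x ∈ rest.takeWhile (fun x => x == w), x = w := by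
    intro x hx
    have := List.mem_takeWhile_imp hx
    simpa using this
  have hDsort : (rest.dropWhile (fun x => x == w)).Pairwise (· ≤ ·) :=
    List.Pairwise.sublist (List.dropWhile_sublist _) hsrest
  have hDgt : ∀ x ∈ rest.dropWhile (fun x => x == w), w < x := by
    cases hcase : rest.dropWhile (fun x => x == w) with
    | nil => simp
    | cons h0 rtl =>
      have hh0 : (h0 == w) = false := by
        have h := List.head?_dropWhile_not (fun x => x == w) rest
        rw [hcase] at h
        exact h
      have hh0mem : h0 ∈ rest := (List.dropWhile_sublist (fun x => x == w)).subset (by rw [hcase]; exact List.mem_cons_self ..)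
      have hne : w ≠ h0 := fun h => by rw [h] at hh0; simp at hh0
      have hwlt : w < h0 := lt_of_le_of_ne (hwle h0 hh0mem) hne
      intro x hx
      rcases List.mem_cons.1 hx with rfl | hx
      · exact hwlt
      · have hp : (h0 :: rtl).Pairwise (· ≤ ·) := by rw [← hcase]; exact hDsort
        exact lt_of_lt_of_le hwlt ((List.pairwise_cons.1 hp).1 x hx)
  have hrest : rest.takeWhile (fun x => x == w) ++ rest.drop (rest.takeWhile (fun x => x == w)).length = rest := by
    rw [hdw]; exact List.takeWhile_append_dropWhile
  have hct : (rest.takeWhile (fun x => x == w)).count w = (rest.takeWhile (fun x => x == w)).length :=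
    List.count_eq_length.2 (fun b hb => (ht b hb).symm)
  have hcD : (rest.dropWhile (fun x => x == w)).count w = 0 :=
    List.count_eq_zero.2 (fun hmem => lt_irrefl w (hDgt w hmem))
  refine ⟨hrest, by rw [hdw]; exact hDgt, by rw [hdw]; exact hDsort, ?_, ?_⟩
  · calc (w :: rest).count w = rest.count w + 1 := List.count_cons_self
      _ = (rest.takeWhile (fun x => x == w)).length + 1 := by
          conv_lhs => rw [← hrest]
          rw [List.count_append, hdw, hct, hcD]
  · intro v hv
    have hvt : (rest.takeWhile (fun x => x == w)).count v = 0 :=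
      List.count_eq_zero.2 (fun hmem => hv (ht v hmem).symm)
    calc (w :: rest).count v = rest.count v := by
          rw [List.count_cons_of_ne hv]
      _ = (rest.drop (rest.takeWhile (fun x => x == w)).length).count v := by
          conv_lhs => rw [← hrest]
          rw [List.count_append, hvt, Nat.zero_add]

theorem runsOf_spec : ∀ (S : List String), S.Pairwise (· ≤ ·) →
    (∀ p ∈ runsOf S, p.2 = S.count p.1) ∧
    (∀ x, x ∈ (runsOf S).map Prod.fst ↔ x ∈ S) ∧
    ((runsOf S).map Prod.fst).Pairwise (· < ·) := by
  intro S
  induction S using runsOf.induct with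
  | case1 => intro _; simp [runsOf]
  | case2 w rest ih =>
    intro hs
    obtain ⟨hrest, hDgt, hDsort, hcw, hcv⟩ := runs_step w rest hs
    obtain ⟨ih1, ih2, ih3⟩ := ih hDsort
    rw [runsOf]
    refine ⟨?_, ?_, ?_⟩
    · intro p hp
      rcases List.mem_cons.1 hp with rfl | hp
      · exact hcw.symm
      · have hpfst : p.1 ∈ rest.drop (rest.takeWhile (fun x => x == w)).length :=
          (ih2 p.1).1 (List.mem_map_of_mem hp)
        have hne : w ≠ p.1 := ne_of_lt (hDgt p.1 hpfst)
        rw [ih1 p hp, hcv p.1 hne]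
    · intro x
      simp only [List.map_cons, List.mem_cons, ih2 x]
      constructor
      · rintro (rfl | hx)
        · exact Or.inl rfl
        · exact Or.inr ((List.drop_sublist _ _).subset hx)
      · rintro (rfl | hx)
        · exact Or.inl rfl
        · rw [← hrest] at hx
          rcases List.mem_append.1 hx with hx | hx
          · have hxw : x = w := by
              have := List.mem_takeWhile_imp hx
              simpa using this
            exact Or.inl hxw
          · exact Or.inr hx
    · simp only [List.map_cons]
      exact List.pairwise_cons.2
        ⟨fun y hy => hDgt y ((ih2 y).1 hy), ih3⟩

theorem pv_foldl_min_mem : ∀ (l : List Nat) (a : Nat), l.foldl min a ∈ a :: l := by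
  intro l
  induction l with
  | nil => simp
  | cons x l ih =>
    intro a
    have h := ih (min a x)
    simp only [List.foldl_cons]
    rcases List.mem_cons.1 h with h | h
    · rw [h]
      rcases Nat.le_total a x with hle | hle
      · simp [Nat.min_eq_left hle]
      · simp [Nat.min_eq_right hle]
    · simp [h]

theorem pv_foldl_min_le : ∀ (l : List Nat) (a : Nat), ∀ y ∈ a :: l, l.foldl min a ≤ y := by
  intro l
  induction l with
  | nil => intro a y hy; simp only [List.foldl_nil]; simp at hy; omega
  | cons x l ih =>
    intro a y hy
    have h := ih (min a x)
    simp only [List.foldl_cons]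
    rcases List.mem_cons.1 hy with rfl | hy
    · exact le_trans (h (min y x) (by simp)) (Nat.min_le_left _ _)
    · rcases List.mem_cons.1 hy with rfl | hy
      · exact le_trans (h (min a y) (by simp)) (Nat.min_le_right _ _)
      · exact h y (by simp [hy])

theorem pv_find?_pair : ∀ (K : List String) (f : String → Int) (v : String), v ∈ K →
    List.find? (fun pr => pr.1 == v) (K.map (fun k => (k, f k))) = some (v, f v) := by
  intro K f v
  induction K with
  | nil => intro h; simp at h
  | cons k kt ih =>
    intro h
    by_cases hk : (k == v) = true
    · have hkv : k = v := by simpa using hk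
      subst hkv
      simp
    · have hv : v ∈ kt := by
        rcases List.mem_cons.1 h with rfl | h
        · exact absurd (by simp) hk
        · exact h
      simp only [List.map_cons]
      rw [List.find?_cons_of_neg (by simpa using hk), ih hv]

theorem pv_get?_counter (xs : List String) (v : String) (h : v ∈ xs) :
    (PySem.Dict.counter xs).get? v = some ((xs.count v : Int)) := by
  show Option.map (fun x => x.2)
      (List.find? (fun pr => pr.1 == v) (PySem.Dict.counter xs).items) = _
  rw [PySem.Dict.items_counter,
    pv_find?_pair _ _ v ((PySem.Set.mem_ofList xs v).2 h)]
  rfl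

theorem pv_foldl_min_cast : ∀ (l : List String) (f : String → Nat) (a : Nat),
    (l.map (fun k => ((f k : Nat) : Int))).foldl min (a : Int)
      = (((l.map f).foldl min a : Nat) : Int) := by
  intro l
  induction l with
  | nil => intro f a; simp
  | cons x l ih =>
    intro f a
    simp only [List.map_cons, List.foldl_cons]
    rw [← Nat.cast_min, ih]

theorem pv_size_counter_eq_zero_iff (L : List String) :
    (PySem.Dict.counter L).size = 0 ↔ L = [] := by
  constructor
  · intro h
    cases hL : L with
    | nil => rfl
    | cons x t =>
      exfalso
      have hx : x ∈ PySem.Set.ofList L := (PySem.Set.mem_ofList L x).2 (by rw [hL]; simp)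
      have : (PySem.Dict.counter L).size = (PySem.Set.ofList L).length := by
        show (PySem.Dict.counter L).items.length = _
        rw [PySem.Dict.items_counter, List.length_map]
      rw [this] at h
      exact absurd (List.length_eq_zero_iff.1 h) (List.ne_nil_of_mem hx)
  · intro h
    subst h
    rfl

theorem pv_core (L : List String) (hL : L ≠ []) :
    (PySem.List.sorted ((PySem.Dict.counter L).keys.filter
        (fun i => (PySem.Dict.counter L).get? i
          == PySem.List.min? (PySem.Dict.counter L).values (fun x => x)))
      (fun x => x)).headD ""
      = pvRuns (PySem.List.sorted L (fun x => x)) none := by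
  have hS : (PySem.List.sorted L (fun x => x)).Pairwise (· ≤ ·) :=
    PySem.List.sorted_pairwise L (fun x => x)
  obtain ⟨h1, h2, h3⟩ := runsOf_spec (PySem.List.sorted L (fun x => x)) hS
  have hPermSL : (PySem.List.sorted L (fun x => x)).Perm L :=
    PySem.List.sorted_perm L (fun x => x) false
  have hcntSL : ∀ v, (PySem.List.sorted L (fun x => x)).count v = L.count v :=
    fun v => hPermSL.count_eq v
  have hUnodup : ((runsOf (PySem.List.sorted L (fun x => x))).map Prod.fst).Nodup :=
    h3.imp ne_of_lt
  have hKnodup : (PySem.Set.ofList L : List String).Nodup := PySem.Set.nodup_ofList L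
  have hUK : ((runsOf (PySem.List.sorted L (fun x => x))).map Prod.fst).Perm
      (PySem.Set.ofList L) :=
    (List.perm_ext_iff_of_nodup hUnodup hKnodup).2
      (fun a => by rw [h2 a, PySem.Set.mem_ofList, hPermSL.mem_iff])
  -- nonemptiness
  obtain ⟨s0, S', hScons⟩ : ∃ a l, PySem.List.sorted L (fun x => x) = a :: l := by
    cases hS0 : PySem.List.sorted L (fun x => x) with
    | nil => exact absurd ((PySem.List.sorted_eq_nil_iff L (fun x => x) false).1 hS0) hL
    | cons a l => exact ⟨a, l, rfl⟩
  obtain ⟨k0, kt, hKcons⟩ : ∃ a l, (PySem.Set.ofList L : List String) = a :: l := by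
    cases hK0 : (PySem.Set.ofList L : List String) with
    | nil =>
      exfalso
      cases hLc : L with
      | nil => exact hL hLc
      | cons x t =>
        have hx : x ∈ PySem.Set.ofList L := (PySem.Set.mem_ofList L x).2 (by rw [hLc]; simp)
        rw [hK0] at hx
        simp at hx
    | cons a l => exact ⟨a, l, rfl⟩
  -- B side: pvRuns via runsOf and fm
  have hruns : runsOf (PySem.List.sorted L (fun x => x))
      = (s0, (S'.takeWhile (fun x => x == s0)).length + 1)
        :: runsOf (S'.drop (S'.takeWhile (fun x => x == s0)).length) := by
    rw [hScons, runsOf]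
  have hhead := fm_spec (runsOf (S'.drop (S'.takeWhile (fun x => x == s0)).length))
    (s0, (S'.takeWhile (fun x => x == s0)).length + 1)
  rw [← hruns] at hhead
  set ps := runsOf (S'.drop (S'.takeWhile (fun x => x == s0)).length) with hps
  set b : String × Nat := (s0, (S'.takeWhile (fun x => x == s0)).length + 1) with hb
  set M := pmin ps b with hM
  -- the Nat minimum of the counts over distinct keys
  set mK : Nat := (kt.map (fun k => L.count k)).foldl min (L.count k0) with hmK
  -- A side: values and min?
  have hvals : (PySem.Dict.counter L).values
      = (PySem.Set.ofList L : List String).map (fun k => (L.count k : Int)) := by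
    show (PySem.Dict.counter L).items.map Prod.snd = _
    rw [PySem.Dict.items_counter, List.map_map]
    rfl
  have hmin : PySem.List.min? (PySem.Dict.counter L).values (fun x => x)
      = some ((mK : Nat) : Int) := by
    rw [hvals, hKcons, List.map_cons, PySem.List.min?_id_cons, pv_foldl_min_cast, ← hmK]
  -- filter congruence on the keys
  have hfc : ((PySem.Dict.counter L).keys.filter
        (fun i => (PySem.Dict.counter L).get? i
          == PySem.List.min? (PySem.Dict.counter L).values (fun x => x)))
      = (PySem.Set.ofList L : List String).filter (fun i => decide (L.count i = mK)) := by
    rw [PySem.Dict.keys_counter]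
    refine List.filter_congr (fun i hi => ?_)
    rw [pv_get?_counter L i ((PySem.Set.mem_ofList L i).1 hi), hmin]
    simp [beq_eq_decide, Nat.cast_inj]
  -- sorted of the filtered keys = filter of the sorted distinct keys
  have hsf : PySem.List.sorted
        ((PySem.Set.ofList L : List String).filter (fun i => decide (L.count i = mK)))
        (fun x => x)
      = ((runsOf (PySem.List.sorted L (fun x => x))).map Prod.fst).filter
          (fun i => decide (L.count i = mK)) :=
    PySem.List.sorted_eq_of_perm_of_pairwise_lt _ _ _
      (hUK.filter _) (List.Pairwise.filter _ h3)
  -- M = mK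
  have hsndmap : (runsOf (PySem.List.sorted L (fun x => x))).map Prod.snd
      = ((runsOf (PySem.List.sorted L (fun x => x))).map Prod.fst).map (fun u => L.count u) := by
    rw [List.map_map]
    exact List.map_congr_left (fun pr hpr => by
      rw [Function.comp_apply, ← hcntSL pr.1]
      exact h1 pr hpr)
  have hMfold : M = (ps.map Prod.snd).foldl min b.2 := by
    rw [hM, pmin, List.foldl_map]
  have hMmem : M ∈ (runsOf (PySem.List.sorted L (fun x => x))).map Prod.snd := by
    rw [hruns, List.map_cons, hMfold]
    exact pv_foldl_min_mem _ _
  have hMle : ∀ y ∈ (runsOf (PySem.List.sorted L (fun x => x))).map Prod.snd, M ≤ y := by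
    rw [hruns, List.map_cons]
    intro y hy
    rw [hMfold]
    exact pv_foldl_min_le _ _ y hy
  have hmKmem : mK ∈ (PySem.Set.ofList L : List String).map (fun k => L.count k) := by
    rw [hKcons, List.map_cons, hmK]
    exact pv_foldl_min_mem _ _
  have hmKle : ∀ y ∈ (PySem.Set.ofList L : List String).map (fun k => L.count k), mK ≤ y := by
    rw [hKcons, List.map_cons]
    intro y hy
    rw [hmK]
    exact pv_foldl_min_le _ _ y hy
  have hpermcnt : ((runsOf (PySem.List.sorted L (fun x => x))).map Prod.snd).Perm
      ((PySem.Set.ofList L : List String).map (fun k => L.count k)) := by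
    rw [hsndmap]
    exact hUK.map _
  have hMmK : M = mK := by
    apply le_antisymm
    · exact hMle mK (hpermcnt.mem_iff.2 hmKmem)
    · exact hmKle M (hpermcnt.mem_iff.1 hMmem)
  -- rewrite runsOf S as a map over its keys
  have hmapruns : runsOf (PySem.List.sorted L (fun x => x))
      = ((runsOf (PySem.List.sorted L (fun x => x))).map Prod.fst).map
          (fun u => (u, L.count u)) := by
    rw [List.map_map]
    conv_lhs => rw [← List.map_id (runsOf (PySem.List.sorted L (fun x => x)))]
    exact List.map_congr_left (fun pr hpr => by
      rw [Function.comp_apply, id_eq]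
      refine Prod.ext rfl ?_
      rw [← hcntSL pr.1]
      exact h1 pr hpr)
  -- turn hhead into a statement about the filtered key list
  rw [hmapruns, List.filter_map, List.head?_map] at hhead
  have hcomp : ((fun pr : String × Nat => decide (pr.2 = M))
        ∘ (fun u => (u, L.count u)))
      = (fun i => decide (L.count i = mK)) := by
    funext u
    simp [Function.comp_apply, hMmK]
  rw [hcomp] at hhead
  -- finish
  rw [hfc, hsf]
  have hB : pvRuns (PySem.List.sorted L (fun x => x)) none = (fmAux ps b).1 := by
    rw [hScons, pvRuns_none]
  rw [hB]
  cases hlist : (((runsOf (PySem.List.sorted L (fun x => x))).map Prod.fst).filter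
      (fun i => decide (L.count i = mK))) with
  | nil =>
    rw [hlist] at hhead
    simp at hhead
  | cons z zs =>
    rw [hlist] at hhead
    simp only [List.head?_cons, Option.map_some] at hhead
    have hz : (z, List.count z L) = fmAux ps b := Option.some.inj hhead
    rw [List.headD_cons]
    simp [← hz]

-- ===== VERDICT (by name: the statement is the Claim_ definition above) =====
theorem rarest_word_spec : Claim_equal_rarest_word := by
  intro string _
  unfold Spec_rarest_word rarest_word rarest_word_alt
  by_cases hg : string = "" ∨ PySem.Str.strIsdigit string
  · simp only [hg, if_true]
  · simp only [hg, if_false]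
    rw [pv_foldl_filter_map]
    simp only [List.nil_append]
    by_cases hL0 : PySem.Str.split₀ (String.ofList
        ((string.toList.filter (fun c => PySem.Chars.isalpha c || PySem.Chars.isspace c)).map
          PySem.Chars.lowerChar)) = []
    · rw [hL0]
      simp [pv_size_counter_eq_zero_iff, PySem.List.sorted_eq_nil_iff]
    · rw [if_neg (fun h => hL0 ((pv_size_counter_eq_zero_iff _).1 h)),
        if_neg (fun h => hL0 ((PySem.List.sorted_eq_nil_iff _ _ _).1 h))]
      exact pv_core _ hL0
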